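-- pv_equiv track=rewrite | github.com/Tulpana/ARC-AGI-2 | arc_agi_2_submission/ril/ordering_patterns.py | extract_unique_colors_ordered
-- ===== SOURCE A (Python) =====
-- from typing import Dict, List, Optional, Tuple
--
-- Grid = List[List[int]]
--
-- def extract_unique_colors_ordered(grid: Grid, order_by: str = 'first-appearance') -> List[int]:
--     """
--     Extract unique colors in specific order.
--     Order types: 'first-appearance', 'frequency', 'value'
--     """
--     if not grid or not grid[0]:
--         return []
--
--     h, w = len(grid), len(grid[0])
--
--     if order_by == 'first-appearance':
--         seen = []
--         for r in range(h):
--             for c in range(w):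
--                 if grid[r][c] != 0 and grid[r][c] not in seen:
--                     seen.append(grid[r][c])
--         return seen
--
--     elif order_by == 'frequency':
--         from collections import Counter
--         colors = [grid[r][c] for r in range(h) for c in range(w) if grid[r][c] != 0]
--         counts = Counter(colors)
--         return [color for color, _ in counts.most_common()]
--
--     elif order_by == 'value':
--         colors = {grid[r][c] for r in range(h) for c in range(w) if grid[r][c] != 0}
--         return sorted(colors)
--
--     return []
-- ===== SOURCE B (Python) =====
-- def _first_seen(xs):
--     """Recursive dedup: the head, then the first-seen of the tail with the head filtered out."""
--     if not xs:
--         return []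
--     head = xs[0]
--     return [head] + _first_seen([v for v in xs[1:] if v != head])
--
--
-- def extract_unique_colors_ordered(grid, order_by='first-appearance'):
--     """Flatten the grid once (rows clipped to the first row's width, zeros dropped),
--     then derive each ordering from the flat cell list: recursive filter-dedup for
--     first-appearance, sorted(set(...)) for value, and a stable sort of the
--     first-appearance list by descending multiplicity (cells.count) for frequency."""
--     if not grid or not grid[0]:
--         return []
--     w = len(grid[0])
--     cells = [v for row in grid for v in row[:w] if v != 0]
--     if order_by == 'first-appearance':
--         return _first_seen(cells)
--     if order_by == 'value':
--         return sorted(set(cells))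
--     if order_by == 'frequency':
--         return sorted(_first_seen(cells), key=lambda c: -cells.count(c))
--     return []
-- ===== Notes on version B (the rewrite author's own statement) =====
-- stated objective: alternative
-- what changed: A runs a mode-specific grid scan (incremental 'not in seen' accumulator loop, a Counter + most_common, a set pass); B flattens the grid once into a flat nonzero cell list and derives every ordering from it: a recursive filter-dedup (head, then recurse on the tail with the head filtered out) for first-appearance, sorted(set(cells)) for value, and a stable sort of the dedup by descending cells.count for frequency - no dict, Counter or accumulator loop.
import Mathlib
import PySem

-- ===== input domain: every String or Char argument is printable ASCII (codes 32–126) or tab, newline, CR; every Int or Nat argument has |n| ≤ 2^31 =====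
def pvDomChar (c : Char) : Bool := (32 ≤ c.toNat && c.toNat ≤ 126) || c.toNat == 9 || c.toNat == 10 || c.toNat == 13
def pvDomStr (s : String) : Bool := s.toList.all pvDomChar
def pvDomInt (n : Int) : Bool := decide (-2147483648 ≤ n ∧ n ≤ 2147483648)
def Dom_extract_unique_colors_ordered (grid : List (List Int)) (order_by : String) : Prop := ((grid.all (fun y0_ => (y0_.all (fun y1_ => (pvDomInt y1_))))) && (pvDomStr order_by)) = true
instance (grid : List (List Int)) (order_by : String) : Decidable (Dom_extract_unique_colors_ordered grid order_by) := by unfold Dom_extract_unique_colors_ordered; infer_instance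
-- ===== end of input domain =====

-- B replaces A's three mode-specific grid scans by one flattening pass plus a recursive filter-dedup, sorted(set), and a count-keyed stable sort (alternative decomposition, similar cost).


-- ===== PORT A =====
-- Literal transliteration of A; grid[r][c] is pyGetD (out-of-range reads, where Python raises
-- IndexError, are excluded by Pre_).
def extract_unique_colors_ordered (grid : List (List Int)) (order_by : String) : List Int :=
  if grid = [] ∨ grid.headD [] = [] then []
  else
    let h : Int := grid.length
    let w : Int := (grid.headD []).length
    if order_by = "first-appearance" then
      (PySem.List.pyRange 0 h 1).foldl (fun seen r =>
        (PySem.List.pyRange 0 w 1).foldl (fun seen c =>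
          if PySem.List.pyGetD (PySem.List.pyGetD grid r []) c 0 ≠ 0 ∧
             PySem.List.pyGetD (PySem.List.pyGetD grid r []) c 0 ∉ seen then
            seen ++ [PySem.List.pyGetD (PySem.List.pyGetD grid r []) c 0]
          else seen) seen) []
    else if order_by = "frequency" then
      let colors := (PySem.List.pyRange 0 h 1).flatMap (fun r =>
        ((PySem.List.pyRange 0 w 1).map (fun c =>
          PySem.List.pyGetD (PySem.List.pyGetD grid r []) c 0)).filter (fun v => v != 0))
      let counts := PySem.Dict.counter colors
      -- counts.most_common() = items stably sorted by count descending
      (PySem.List.sorted counts.items (fun kv => kv.2) true).map (fun kv => kv.1)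
    else if order_by = "value" then
      let colors := PySem.Set.ofList ((PySem.List.pyRange 0 h 1).flatMap (fun r =>
        ((PySem.List.pyRange 0 w 1).map (fun c =>
          PySem.List.pyGetD (PySem.List.pyGetD grid r []) c 0)).filter (fun v => v != 0)))
      PySem.List.sorted colors (fun x => x) false
    else []

-- ===== PORT B =====
-- _first_seen: head, then first-seen of the tail with the head filtered out
def pv_firstSeen : List Int → List Int
  | [] => []
  | head :: tail => [head] ++ pv_firstSeen (tail.filter (fun v => v != head))
termination_by xs => xs.length
decreasing_by
  simp only [List.length_cons, List.length_unattach]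
  exact Nat.lt_succ_of_le (le_trans (List.length_filter_le _ _) (by simp))

def extract_unique_colors_ordered_alt (grid : List (List Int)) (order_by : String) : List Int :=
  if grid = [] ∨ grid.headD [] = [] then []
  else
    let w : Int := (grid.headD []).length
    let cells := grid.flatMap (fun row =>
      (PySem.List.slice row none (some w)).filter (fun v => v != 0))
    if order_by = "first-appearance" then pv_firstSeen cells
    else if order_by = "value" then
      PySem.List.sorted (PySem.Set.ofList cells) (fun x => x) false
    else if order_by = "frequency" then
      -- key = -cells.count(c); cells.count never raises, so no option is needed
      PySem.List.sorted (pv_firstSeen cells) (fun c => -(PySem.List.count cells c : Int)) false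
    else []

-- ===== PRECONDITION & SPEC =====
-- Pre_ excludes exactly the inputs on which A raises IndexError: a recognized order_by with some
-- row shorter than the first row (A indexes every row at columns 0..len(grid[0])-1).
-- B returns normally there (it reads each row clipped to the first row's width).
def Pre_extract_unique_colors_ordered (grid : List (List Int)) (order_by : String) : Prop :=
  (order_by = "first-appearance" ∨ order_by = "frequency" ∨ order_by = "value") →
    ∀ row ∈ grid, (grid.headD []).length ≤ row.length
instance (grid : List (List Int)) (order_by : String) : Decidable (Pre_extract_unique_colors_ordered grid order_by) := by unfold Pre_extract_unique_colors_ordered; infer_instance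

def pvWitness_extract_unique_colors_ordered : List (List Int) × String := ([[1, 2], [2, 3]], "frequency")

def Spec_extract_unique_colors_ordered (grid : List (List Int)) (order_by : String) (out : List Int) : Prop := out = extract_unique_colors_ordered_alt grid order_by
instance (grid : List (List Int)) (order_by : String) (out : List Int) : Decidable (Spec_extract_unique_colors_ordered grid order_by out) := by unfold Spec_extract_unique_colors_ordered; infer_instance

-- ===== CLAIM (what is proved, stated in full; the proofs are below) =====
def Claim_equal_extract_unique_colors_ordered : Prop := ∀ (grid : List (List Int)) (order_by : String), Dom_extract_unique_colors_ordered grid order_by → Pre_extract_unique_colors_ordered grid order_by → Spec_extract_unique_colors_ordered grid order_by (extract_unique_colors_ordered grid order_by)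

-- ===== LEMMAS AND PROOFS =====
-- row read clipped: map over range(w) of row[c] = row.take w
theorem pv_rowmap (row : List Int) (w : Nat) (hw : w ≤ row.length) :
    (PySem.List.pyRange 0 (w:Int) 1).map (fun c => PySem.List.pyGetD row c 0) = row.take w := by
  have h := PySem.List.map_pyGetD_pyRange_zero' (row.take w) 0
  rw [List.length_take, Nat.min_eq_left hw] at h
  rw [← h]
  apply List.map_congr_left
  intro c hc
  rw [PySem.List.mem_pyRange_one] at hc
  obtain ⟨h0, hlt⟩ := hc
  lift c to Nat using h0
  rw [PySem.List.pyGetD_natCast, PySem.List.pyGetD_natCast]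
  have hcw : c < w := by exact_mod_cast hlt
  simp [List.getD, hcw]

def pv_cells (grid : List (List Int)) (w : Nat) : List Int := grid.flatMap (fun row => row.take w)

theorem pv_inner (row : List Int) (w : Nat) (hw : w ≤ row.length) {σ : Type}
    (f : σ → Int → σ) (init : σ) :
    (PySem.List.pyRange 0 (w:Int) 1).foldl (fun s c =>
        f s (PySem.List.pyGetD row c 0)) init = (row.take w).foldl f init := by
  rw [← pv_rowmap row w hw, List.foldl_map]

-- A's nested index loop = fold over the clipped cells
theorem pv_foldl_reduce {σ : Type} (grid : List (List Int)) (w : Nat)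
    (hw : ∀ row ∈ grid, w ≤ row.length) (f : σ → Int → σ) (init : σ) :
    (PySem.List.pyRange 0 (grid.length:Int) 1).foldl (fun s r =>
      (PySem.List.pyRange 0 (w:Int) 1).foldl (fun s c =>
        f s (PySem.List.pyGetD (PySem.List.pyGetD grid r []) c 0)) s) init
    = (pv_cells grid w).foldl f init := by
  rw [PySem.List.foldl_pyRange_zero_pyGetD' grid ([] : List Int)
      (fun s row => (PySem.List.pyRange 0 (w:Int) 1).foldl (fun s c =>
        f s (PySem.List.pyGetD row c 0)) s) init]
  induction grid generalizing init with
  | nil => rfl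
  | cons row gs ih =>
      simp only [List.foldl_cons, pv_cells, List.flatMap_cons, List.foldl_append]
      rw [pv_inner row w (hw row (by simp)) f init]
      exact ih (fun r hr => hw r (by simp [hr])) _

-- A's comprehension = filter of the clipped cells
theorem pv_comp_reduce (grid : List (List Int)) (w : Nat)
    (hw : ∀ row ∈ grid, w ≤ row.length) (p : Int → Bool) :
    (PySem.List.pyRange 0 (grid.length:Int) 1).flatMap (fun r =>
      ((PySem.List.pyRange 0 (w:Int) 1).map (fun c =>
        PySem.List.pyGetD (PySem.List.pyGetD grid r []) c 0)).filter p)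
    = (pv_cells grid w).filter p := by
  rw [List.flatMap_def]
  have h1 : (PySem.List.pyRange 0 (grid.length:Int) 1).map (fun r =>
      ((PySem.List.pyRange 0 (w:Int) 1).map (fun c =>
        PySem.List.pyGetD (PySem.List.pyGetD grid r []) c 0)).filter p)
      = grid.map (fun row => (row.take w).filter p) := by
    rw [show (fun r => ((PySem.List.pyRange 0 (w:Int) 1).map (fun c =>
          PySem.List.pyGetD (PySem.List.pyGetD grid r []) c 0)).filter p)
        = (fun row => ((PySem.List.pyRange 0 (w:Int) 1).map (fun c =>
          PySem.List.pyGetD row c 0)).filter p) ∘ (fun j => PySem.List.pyGetD grid j []) from rfl,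
      ← List.map_map, PySem.List.map_pyGetD_pyRange_zero']
    apply List.map_congr_left
    intro row hr
    rw [pv_rowmap row w (hw row hr)]
  rw [h1, pv_cells, List.flatMap_def, List.filter_flatten, List.map_map]
  rfl

-- the shared flat cell list (row-major, clipped to the first row's width, zeros dropped)
def pv_colors (grid : List (List Int)) (w : Nat) : List Int :=
  (pv_cells grid w).filter (fun v => v != 0)

-- A's seen-accumulator loop over the cells = Set.ofList of the color list
theorem pv_seenfold (cells : List Int) (s : List Int) :
    cells.foldl (fun seen v => if v ≠ 0 ∧ v ∉ seen then seen ++ [v] else seen) s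
    = (cells.filter (fun v => v != 0)).foldl PySem.Set.add s := by
  induction cells generalizing s with
  | nil => rfl
  | cons v vs ih =>
      rw [List.foldl_cons, List.filter_cons]
      by_cases h0 : v = 0
      · simp [h0, ih]
      · have hb : (v != 0) = true := by simp [h0]
        rw [if_pos hb, List.foldl_cons, PySem.Set.add_eq_ite, ih]
        by_cases hm : v ∈ s
        · rw [if_pos hm, if_neg (by simp [hm])]
        · rw [if_neg hm, if_pos ⟨h0, hm⟩]

-- A's comprehension = the shared color list
theorem pv_comp_colors (grid : List (List Int)) (w : Nat)
    (hw : ∀ row ∈ grid, w ≤ row.length) :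
    (PySem.List.pyRange 0 (grid.length:Int) 1).flatMap (fun r =>
      ((PySem.List.pyRange 0 (w:Int) 1).map (fun c =>
        PySem.List.pyGetD (PySem.List.pyGetD grid r []) c 0)).filter (fun v => v != 0))
    = pv_colors grid w := pv_comp_reduce grid w hw _

-- B's flattening comprehension = the shared color list
theorem pv_bcells (grid : List (List Int)) (w : Nat) :
    grid.flatMap (fun row =>
      (PySem.List.slice row none (some (w:Int))).filter (fun v => v != 0))
    = pv_colors grid w := by
  rw [pv_colors, pv_cells, List.filter_flatMap]
  congr 1
  funext row
  rw [PySem.List.slice_to row (Int.natCast_nonneg w), Int.toNat_natCast]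

-- adding elements ≠ x onto an accumulator headed by x keeps the head
theorem pv_fold_add_cons (ys : List Int) (x : Int) (s : List Int) (hx : x ∉ ys) :
    ys.foldl PySem.Set.add (x :: s) = x :: ys.foldl PySem.Set.add s := by
  induction ys generalizing s with
  | nil => rfl
  | cons v vs ih =>
      have hvx : v ≠ x := fun h => hx (by simp [h])
      have hx' : x ∉ vs := fun h => hx (by simp [h])
      rw [List.foldl_cons, List.foldl_cons, PySem.Set.add_eq_ite, PySem.Set.add_eq_ite]
      by_cases hm : v ∈ s
      · rw [if_pos hm, if_pos (by simp [hm]), ih s hx']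
      · rw [if_neg hm, if_neg (by simp [hvx, hm]),
          show x :: s ++ [v] = x :: (s ++ [v]) from rfl, ih (s ++ [v]) hx']

-- occurrences of an element already in the accumulator can be filtered out
theorem pv_fold_add_filter (ys : List Int) (x : Int) (s : List Int) (hx : x ∈ s) :
    ys.foldl PySem.Set.add s = (ys.filter (fun v => v != x)).foldl PySem.Set.add s := by
  induction ys generalizing s with
  | nil => rfl
  | cons v vs ih =>
      rw [List.foldl_cons, List.filter_cons]
      by_cases hvx : v = x
      · subst hvx
        rw [if_neg (by simp), PySem.Set.add_eq_ite, if_pos hx, ih s hx]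
      · rw [if_pos (by simp [hvx]), List.foldl_cons]
        apply ih
        rw [PySem.Set.add_eq_ite]
        split_ifs <;> simp [hx]

-- the recursive filter-dedup computes set(xs)'s insertion-ordered element list
theorem pv_firstSeen_eq_ofList (xs : List Int) : pv_firstSeen xs = PySem.Set.ofList xs := by
  induction hn : xs.length using Nat.strong_induction_on generalizing xs with
  | _ n ih =>
      match xs with
      | [] => rw [pv_firstSeen, PySem.Set.ofList_eq_foldl]; rfl
      | x :: tail =>
          rw [pv_firstSeen, PySem.Set.ofList_eq_foldl, List.foldl_cons,
            show PySem.Set.add [] x = [x] from rfl,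
            pv_fold_add_filter tail x [x] (by simp),
            pv_fold_add_cons _ x [] (by simp),
            ← PySem.Set.ofList_eq_foldl,
            ← ih ((tail.filter (fun v => v != x)).length)
              (by have := List.length_filter_le (fun v => v != x) tail; simp at hn; omega)
              _ rfl]
          rfl

-- reverse=True sorting by key = ascending sorting by -key (insertBy comparators coincide)
theorem pv_sorted_rev_neg {α : Type} (l : List α) (key : α → Int) :
    PySem.List.sorted l key true = PySem.List.sorted l (fun x => -(key x)) false := by
  rw [PySem.List.sorted_rev_eq_foldl_insertBy, PySem.List.sorted_eq_foldl_insertBy]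
  have : (fun (a b : α) => decide (key b < key a)) = (fun a b => decide (-(key a) < -(key b))) := by
    funext a b; simp
  rw [this]

theorem pv_insertBy_map {α β : Type} (g : α → β) (bf : β → β → Bool) (x : α) (l : List α) :
    PySem.List.insertBy bf (g x) (l.map g) = (PySem.List.insertBy (fun a b => bf (g a) (g b)) x l).map g := by
  induction l with
  | nil => simp [PySem.List.insertBy]
  | cons y ys ih =>
      simp only [List.map_cons, PySem.List.insertBy]
      split_ifs <;> simp [ih]

-- most_common's stable sort of (color, count) pairs projects to a key-sort of the colors
theorem pv_sorted_pairs (l : List Int) (f : Int → Int) :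
    (PySem.List.sorted (l.map (fun k => (k, f k))) (fun kv => kv.2) true).map (fun kv => kv.1)
    = PySem.List.sorted l (fun k => f k) true := by
  rw [PySem.List.sorted_rev_eq_foldl_insertBy, PySem.List.sorted_rev_eq_foldl_insertBy, List.foldl_map]
  have key : ∀ (acc : List Int),
      l.foldl (fun acc x => PySem.List.insertBy (fun a b => decide (b.2 < a.2)) (x, f x) acc)
        (acc.map (fun k => (k, f k)))
      = (l.foldl (fun acc x => PySem.List.insertBy (fun a b => decide (f b < f a)) x acc) acc).map
          (fun k => (k, f k)) := by
    induction l with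
    | nil => intro acc; rfl
    | cons x xs ih =>
        intro acc
        rw [List.foldl_cons, List.foldl_cons,
          pv_insertBy_map (fun k => (k, f k)) (fun a b => decide (b.2 < a.2)) x acc]
        exact ih _
  have h0 := key []
  simp only [List.map_nil] at h0
  rw [h0, List.map_map]
  exact List.map_id'' (congrFun rfl) _

-- ===== VERDICT (by name: the statement is the Claim_ definition above) =====
theorem extract_unique_colors_ordered_spec : Claim_equal_extract_unique_colors_ordered := by
  intro grid order_by hDom hPre
  unfold Spec_extract_unique_colors_ordered
  unfold extract_unique_colors_ordered extract_unique_colors_ordered_alt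
  by_cases hg : grid = [] ∨ grid.headD [] = []
  · rw [if_pos hg, if_pos hg]
  · simp only [if_neg hg]
    rw [pv_bcells grid (grid.headD []).length]
    by_cases h1 : order_by = "first-appearance"
    · subst h1
      have hw := hPre (Or.inl rfl)
      rw [if_pos rfl, if_pos rfl,
        pv_foldl_reduce grid (grid.headD []).length hw
          (fun seen v => if v ≠ 0 ∧ v ∉ seen then seen ++ [v] else seen) [],
        pv_seenfold, pv_firstSeen_eq_ofList, PySem.Set.ofList_eq_foldl]
      rfl
    · by_cases h2 : order_by = "frequency"
      · subst h2
        have hw := hPre (Or.inr (Or.inl rfl))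
        have hne : ¬("frequency" = "first-appearance") := by decide
        have hnv : ¬("frequency" = "value") := by decide
        rw [if_neg hne, if_pos rfl, if_neg hne, if_neg hnv, if_pos rfl,
          pv_comp_colors grid (grid.headD []).length hw,
          PySem.Dict.items_counter, pv_sorted_pairs, pv_firstSeen_eq_ofList,
          pv_sorted_rev_neg]
        simp only [PySem.List.count_eq]
      · by_cases h3 : order_by = "value"
        · subst h3
          have hw := hPre (Or.inr (Or.inr rfl))
          have hne : ¬("value" = "first-appearance") := by decide
          have hnf : ¬("value" = "frequency") := by decide
          rw [if_neg hne, if_neg hnf, if_pos rfl, if_neg hne, if_pos rfl,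
            pv_comp_colors grid (grid.headD []).length hw]
        · rw [if_neg h1, if_neg h2, if_neg h3, if_neg h1, if_neg h3, if_neg h2]
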